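-- pv_equiv track=rewrite | github.com/Zenasj/HBTGen-artifact | data/pytorch-issue/issue_103563.py | f
-- ===== SOURCE A (Python) =====
-- def f(x):
--     data = [[1, 2, 3], [4, 5, 6], [7, 8, 9]]
--
--     for i in range(3):
--         if i == 0:
--             data[0][i] = x
--         else:
--             data[0][i] = data[0][i - 1] + 1
--     return data[0][-1]
-- ===== SOURCE B (Python) =====
-- def f(x):
--     return x + 2
-- ===== Notes on version B (the rewrite author's own statement) =====
-- stated objective: simpler
-- what changed: Replaced the 3x3 matrix and the index loop by the closed form x + 2, since the loop only ever writes x, x+1, x+2 into row 0 and returns its last cell.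
import Mathlib
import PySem

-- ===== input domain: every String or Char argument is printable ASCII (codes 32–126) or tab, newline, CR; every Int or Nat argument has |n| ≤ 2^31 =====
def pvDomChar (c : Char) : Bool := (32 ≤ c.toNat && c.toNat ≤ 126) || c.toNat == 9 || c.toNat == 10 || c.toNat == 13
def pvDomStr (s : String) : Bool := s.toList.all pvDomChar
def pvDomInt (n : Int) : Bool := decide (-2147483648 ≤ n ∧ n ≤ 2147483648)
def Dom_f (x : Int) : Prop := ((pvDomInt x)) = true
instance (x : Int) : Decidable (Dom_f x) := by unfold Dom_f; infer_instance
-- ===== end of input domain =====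

-- B replaces A's 3x3 matrix and fixed index loop by the closed form x + 2 (objective: simpler).


-- ===== PORT A =====
-- Literal transliteration: build the 3x3 matrix, loop i in range(3) mutating row 0,
-- return data[0][-1]. Indices are always in range, so the .getD defaults are never hit.
def f (x : Int) : Int :=
  let data0 : List (List Int) := [[1, 2, 3], [4, 5, 6], [7, 8, 9]]
  let data := (PySem.List.pyRange 0 3 1).foldl
    (fun d i =>
      let row := (PySem.List.pyGet? d 0).getD []
      let row' := if i == 0 then row.set 0 x
                  else row.set i.toNat (((PySem.List.pyGet? row (i - 1)).getD 0) + 1)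
      d.set 0 row')
    data0
  (PySem.List.pyGet? ((PySem.List.pyGet? data 0).getD []) (-1)).getD 0

-- ===== PORT B =====
def f_alt (x : Int) : Int := x + 2

-- ===== PRECONDITION & SPEC =====
def Spec_f (x : Int) (out : Int) : Prop := out = f_alt x
instance (x : Int) (out : Int) : Decidable (Spec_f x out) := by unfold Spec_f; infer_instance

-- ===== CLAIM (what is proved, stated in full; the proofs are below) =====
def Claim_equal_f : Prop := ∀ (x : Int), Dom_f x → Spec_f x (f x)

-- ===== LEMMAS AND PROOFS =====

-- ===== VERDICT (by name: the statement is the Claim_ definition above) =====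
theorem f_spec : Claim_equal_f := by
  intro x _
  unfold Spec_f f f_alt
  have hr : PySem.List.pyRange 0 3 1 = [0, 1, 2] := by decide
  simp [hr, PySem.List.pyGet?, PySem.List.pyIdx?]
  omega
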